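-- pv_equiv track=rewrite | github.com/khaphan-github/nlp | transformation_learning_base.py | get_initial_tags
-- ===== SOURCE A (Python) =====
-- from collections import defaultdict, Counter
--
-- def get_initial_tags(data):
--     word_tag_freq = defaultdict(Counter)
--     for sentence in data:
--         for word, tag in sentence:
--             word_tag_freq[word][tag] += 1
--
--     # Assign most frequent tag
--     most_freq_tag = {}
--     for word in word_tag_freq:
--         most_freq_tag[word] = word_tag_freq[word].most_common(1)[0][0]
--     return most_freq_tag
-- ===== SOURCE B (Python) =====
-- def get_initial_tags(data):
--     # Brute force without any frequency table: at each word's first occurrence,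
--     # collect its distinct tags in order and pick the max by direct token counting.
--     tokens = [pair for sentence in data for pair in sentence]
--     result = {}
--     for word, tag in tokens:
--         if word in result:
--             continue
--         tags = []
--         for w2, t2 in tokens:
--             if w2 == word and t2 not in tags:
--                 tags.append(t2)
--         result[word] = max(tags, key=lambda t: tokens.count((word, t)))
--     return result
-- ===== Notes on version B (the rewrite author's own statement) =====
-- stated objective: alternative
-- what changed: Drops all frequency tables: B scans the flat token list at each word's first occurrence, collects that word's distinct tags in order, and picks the argmax tag by direct tokens.count, relying on max's first-maximum rule for Counter-compatible tie-breaking; it trades A's linear hash counting for table-free quadratic rescans.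
import Mathlib
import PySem

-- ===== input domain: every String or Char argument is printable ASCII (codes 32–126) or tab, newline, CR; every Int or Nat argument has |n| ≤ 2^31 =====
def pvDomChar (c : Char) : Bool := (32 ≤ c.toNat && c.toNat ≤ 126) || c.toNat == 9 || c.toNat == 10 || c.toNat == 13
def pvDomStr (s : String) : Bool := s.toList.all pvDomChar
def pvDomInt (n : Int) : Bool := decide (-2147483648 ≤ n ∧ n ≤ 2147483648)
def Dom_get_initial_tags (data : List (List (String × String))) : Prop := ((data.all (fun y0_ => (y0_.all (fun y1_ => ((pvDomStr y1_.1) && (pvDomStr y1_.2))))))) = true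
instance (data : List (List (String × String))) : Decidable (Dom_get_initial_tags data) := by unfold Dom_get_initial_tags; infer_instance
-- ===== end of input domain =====

-- B drops all frequency tables: at each word's first occurrence it rescans the flat token
-- list for the word's distinct tags in order and picks the argmax tag by direct counting
-- (a table-free alternative of quadratic cost; not claimed faster).

-- ===== PORT A =====
-- Counter.most_common(1) = stable sort by count, reverse=True, first element; the counter
-- of a present key is nonempty, so the headD default is never used.
def get_initial_tags (data : List (List (String × String))) : List (String × String) :=
  let word_tag_freq : PySem.Dict String (PySem.Dict String Int) :=
    data.foldl (fun acc sentence =>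
      sentence.foldl (fun acc wt =>
        acc.modify wt.1 PySem.Dict.empty (fun c => c.modify wt.2 0 (· + 1))) acc)
      PySem.Dict.empty
  let most_freq_tag : PySem.Dict String String :=
    word_tag_freq.keys.foldl (fun res w =>
      res.insert w
        (((PySem.List.sorted (word_tag_freq.getD w PySem.Dict.empty).items
            (fun p => p.2) true).headD ("", 0)).1))
      PySem.Dict.empty
  most_freq_tag.items

-- ===== PORT B =====
-- `tags` is nonempty whenever the branch runs (it contains at least the current token's
-- tag), so Python's max never raises and the getD default is never used.
def get_initial_tags_alt (data : List (List (String × String))) : List (String × String) :=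
  let tokens := data.flatten
  let result : PySem.Dict String String :=
    tokens.foldl (fun res wt =>
      if res.contains wt.1 = true then res
      else
        let tags := tokens.foldl (fun ts p =>
          if p.1 == wt.1 && !(List.contains ts p.2) then ts ++ [p.2] else ts)
          ([] : List String)
        res.insert wt.1
          ((PySem.List.max? tags (fun t => (PySem.List.count tokens (wt.1, t) : Int))).getD ""))
      PySem.Dict.empty
  result.items

-- ===== PRECONDITION & SPEC =====
def Spec_get_initial_tags (data : List (List (String × String))) (out : List (String × String)) : Prop := out = get_initial_tags_alt data
instance (data : List (List (String × String))) (out : List (String × String)) : Decidable (Spec_get_initial_tags data out) := by unfold Spec_get_initial_tags; infer_instance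

-- ===== CLAIM (what is proved, stated in full; the proofs are below) =====
def Claim_equal_get_initial_tags : Prop := ∀ (data : List (List (String × String))), Dom_get_initial_tags data → Spec_get_initial_tags data (get_initial_tags data)

-- ===== LEMMAS AND PROOFS =====

-- `first maximum' step: keep the stored pair unless the new one is strictly larger.
def pvStep (acc : Option (String × Int)) (p : String × Int) : Option (String × Int) :=
  match acc with
  | none => some p
  | some b => if b.2 < p.2 then some p else some b

theorem head_sorted_rev (xs : List (String × Int)) :
    (PySem.List.sorted xs (fun p => p.2) true).head? = xs.foldl pvStep none := by
  induction xs using List.reverseRecOn with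
  | nil => rfl
  | append_singleton xs x ih =>
    have hs : PySem.List.sorted (xs ++ [x]) (fun p => p.2) true
        = PySem.List.insertBy (fun a b => decide (b.2 < a.2)) x
            (PySem.List.sorted xs (fun p => p.2) true) := by
      simp [PySem.List.sorted, List.foldl_append]
    rw [hs, List.foldl_append, List.foldl_cons, List.foldl_nil]
    cases hl : PySem.List.sorted xs (fun p => p.2) true with
    | nil =>
      rw [hl] at ih
      rw [← ih]
      simp [PySem.List.insertBy, pvStep]
    | cons y ys =>
      rw [hl] at ih
      rw [← ih]
      by_cases hxy : y.2 < x.2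
      · simp [PySem.List.insertBy, pvStep, hxy]
      · simp [PySem.List.insertBy, pvStep, hxy]

-- the nested counter loop of A, per word: inner dict = Counter of w's tags
theorem A_inner_counter (L : List (String × String)) (w : String)
    (d : PySem.Dict String (PySem.Dict String Int)) :
    (L.foldl (fun acc wt =>
        acc.modify wt.1 PySem.Dict.empty (fun c => c.modify wt.2 0 (· + 1))) d).getD w PySem.Dict.empty
      = ((L.filter (fun p => p.1 == w)).map (fun p => p.2)).foldl
          (fun c t => c.modify t 0 (· + 1)) (d.getD w PySem.Dict.empty) := by
  induction L generalizing d with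
  | nil => rfl
  | cons a l ih =>
    rw [List.foldl_cons, ih, List.filter_cons]
    by_cases h : a.1 = w
    · simp [h]
    · have hne : ¬ w = a.1 := fun he => h he.symm
      simp [PySem.Dict.getD_modify, hne, h]

theorem count_snd_filter (L : List (String × String)) (w t : String) :
    ((L.filter (fun p => p.1 == w)).map (fun p => p.2)).count t = L.count (w, t) := by
  rw [List.count_eq_countP, List.count_eq_countP, List.countP_map, List.countP_filter]
  apply List.countP_congr
  intro p _
  constructor
  · intro h
    simp only [Function.comp, beq_iff_eq, Bool.and_eq_true] at h ⊢
    obtain ⟨h1, h2⟩ := h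
    simp [Prod.ext_iff, h1, h2]
  · intro h
    simp only [beq_iff_eq] at h
    simp [Function.comp, h]

-- B's inner loop collects the distinct tags of w, in first-seen order
theorem tags_fold (w : String) (tokens : List (String × String)) (acc : List String) :
    tokens.foldl (fun ts p =>
        if p.1 == w && !(List.contains ts p.2) then ts ++ [p.2] else ts) acc
      = ((tokens.filter (fun p => p.1 == w)).map (fun p => p.2)).foldl PySem.Set.add acc := by
  induction tokens generalizing acc with
  | nil => rfl
  | cons p l ih =>
    rw [List.foldl_cons, List.filter_cons]
    by_cases h : p.1 = w
    · have hcnd : (if (p.1 == w && !(List.contains acc p.2)) = true then acc ++ [p.2] else acc)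
          = PySem.Set.add acc p.2 := by
        by_cases hc : List.contains acc p.2 = true
        · simp [PySem.Set.add, h, PySem.Set.contains]
        · simp [PySem.Set.add, h, PySem.Set.contains]
      rw [hcnd, ih]
      simp [h]
    · have hb : (p.1 == w) = false := by simp [h]
      simp only [hb, Bool.false_and, Bool.false_eq_true, if_false]
      exact ih acc

-- max with a key, paired with its key value, is the pvStep fold
theorem pvStep_max (f : String → Int) (l : List String) :
    ((l.map (fun t => (t, f t))).foldl pvStep none)
      = (PySem.List.max? l f).map (fun m => (m, f m)) := by
  induction l using List.reverseRecOn with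
  | nil => rfl
  | append_singleton l x ih =>
    rw [List.map_append, List.map_singleton, List.foldl_append, List.foldl_cons,
        List.foldl_nil, ih]
    cases hm : PySem.List.max? l f with
    | none =>
      have hl : l = [] := (PySem.List.max?_eq_none_iff l f).mp hm
      subst hl
      rfl
    | some m =>
      have hstep : PySem.List.max? (l ++ [x]) f = (if f m < f x then some x else some m) := by
        unfold PySem.List.max? at hm ⊢
        rw [List.foldl_append, List.foldl_cons, List.foldl_nil, hm]
      rw [hstep]
      by_cases h : f m < f x <;> simp [pvStep, h]

-- B's outer loop: first-occurrence insertion builds the map over the word set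
theorem B_outer (tokens : List (String × String)) (v : String → String) :
    (tokens.foldl (fun (res : PySem.Dict String String) wt =>
        if res.contains wt.1 = true then res else res.insert wt.1 (v wt.1)) PySem.Dict.empty).items
      = (PySem.Set.ofList (tokens.map (fun p => p.1))).map (fun w => (w, v w)) := by
  induction tokens using List.reverseRecOn with
  | nil => rfl
  | append_singleton l q ih =>
    rw [List.foldl_append, List.foldl_cons, List.foldl_nil, List.map_append,
        List.map_singleton, PySem.Set.ofList_append_singleton]
    set d := l.foldl (fun (res : PySem.Dict String String) wt =>
        if res.contains wt.1 = true then res else res.insert wt.1 (v wt.1)) PySem.Dict.empty with hd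
    set W := PySem.Set.ofList (l.map (fun p => p.1)) with hW
    have hkeys : d.keys = W := by
      rw [PySem.Dict.keys, ih, List.map_map]
      exact List.map_id _
    have hcont : d.contains q.1 = decide (q.1 ∈ W) := by
      rw [PySem.Dict.contains_eq_decide_mem_keys, hkeys]
    by_cases hm : q.1 ∈ W
    · rw [hcont, decide_eq_true hm, if_pos rfl, PySem.Set.add_of_mem hm, ih]
    · rw [hcont, decide_eq_false hm, if_neg (by simp), PySem.Set.add_of_not_mem hm]
      rw [PySem.Dict.items_insert_of_not_contains _ _ (by rw [hcont]; exact decide_eq_false hm)]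
      rw [ih, List.map_append, List.map_singleton]

theorem get_initial_tags_spec : Claim_equal_get_initial_tags := by
  intro data _
  unfold Spec_get_initial_tags get_initial_tags get_initial_tags_alt
  simp only [← List.foldl_flatten]
  set L := data.flatten with hL
  set wtf := L.foldl (fun acc wt =>
      acc.modify wt.1 PySem.Dict.empty (fun c => c.modify wt.2 0 (· + 1)))
      (PySem.Dict.empty : PySem.Dict String (PySem.Dict String Int)) with hwtf
  have hkeys : wtf.keys = PySem.Set.ofList (L.map (fun p => p.1)) := by
    rw [hwtf, PySem.Dict.keys_foldl_modify_key L (fun wt => wt.1) PySem.Dict.empty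
        (fun _ wt c => c.modify wt.2 0 (· + 1)) PySem.Dict.empty]
    rfl
  set W := PySem.Set.ofList (L.map (fun p => p.1)) with hW
  have hA2 : (W.foldl (fun res w =>
      res.insert w (((PySem.List.sorted (wtf.getD w PySem.Dict.empty).items
        (fun p => p.2) true).headD ("", 0)).1)) PySem.Dict.empty).items
      = W.map (fun w => (w, ((PySem.List.sorted (wtf.getD w PySem.Dict.empty).items
        (fun p => p.2) true).headD ("", 0)).1)) := by
    rw [PySem.Dict.items_foldl_insert_fresh W (fun w => w) _ PySem.Dict.empty
      (fun a _ => PySem.Dict.contains_empty a) (by simpa using PySem.Set.nodup_ofList _)]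
    simp [PySem.Dict.empty]
  rw [hkeys, hA2]
  have hB := B_outer L (fun x =>
    ((PySem.List.max? (L.foldl (fun ts p =>
        if p.1 == x && !(List.contains ts p.2) then ts ++ [p.2] else ts) ([] : List String))
      (fun t => (PySem.List.count L (x, t) : Int))).getD ""))
  refine Eq.trans ?_ hB.symm
  apply List.map_congr_left
  intro w hwmem
  -- tags of w in the token stream, with duplicates
  set T := (L.filter (fun p => p.1 == w)).map (fun p => p.2) with hT
  have hTne : T ≠ [] := by
    rcases List.mem_map.mp ((PySem.Set.mem_ofList _ _).mp hwmem) with ⟨p, hp, hpw⟩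
    have : p.2 ∈ T := List.mem_map_of_mem (List.mem_filter.mpr ⟨hp, by simp [hpw]⟩)
    exact List.ne_nil_of_mem this
  -- A's inner dict is Counter(T)
  have hinner : wtf.getD w PySem.Dict.empty = PySem.Dict.counter T := by
    rw [hwtf, A_inner_counter, PySem.Dict.counter_eq_foldl]
    rfl
  -- B's key function equals counting inside T
  have hf : (fun t => (PySem.List.count L (w, t) : Int)) = (fun t => ((T.count t : Nat) : Int)) := by
    funext t
    rw [hT, count_snd_filter]
    rfl
  -- B's distinct-tag list
  have htags : L.foldl (fun ts p =>
      if p.1 == w && !(List.contains ts p.2) then ts ++ [p.2] else ts) ([] : List String)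
      = PySem.Set.ofList T := by
    rw [tags_fold, hT, PySem.Set.ofList_eq_foldl]
  have hSne : PySem.Set.ofList T ≠ [] := by
    rcases List.exists_mem_of_ne_nil T hTne with ⟨t, ht⟩
    exact List.ne_nil_of_mem ((PySem.Set.mem_ofList _ _).mpr ht)
  obtain ⟨m, hmax⟩ : ∃ m, PySem.List.max? (PySem.Set.ofList T)
      (fun t => ((T.count t : Nat) : Int)) = some m := by
    cases hmx : PySem.List.max? (PySem.Set.ofList T) (fun t => ((T.count t : Nat) : Int)) with
    | none => exact absurd ((PySem.List.max?_eq_none_iff _ _).mp hmx) hSne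
    | some m => exact ⟨m, rfl⟩
  -- A's per-word value
  have hAval : ((PySem.List.sorted (wtf.getD w PySem.Dict.empty).items
      (fun p => p.2) true).headD ("", 0)).1 = m := by
    rw [List.headD_eq_head?_getD, head_sorted_rev, hinner, PySem.Dict.items_counter,
        pvStep_max, hmax]
    rfl
  -- B's per-word value
  have hBval : ((PySem.List.max? (L.foldl (fun ts p =>
      if p.1 == w && !(List.contains ts p.2) then ts ++ [p.2] else ts) ([] : List String))
      (fun t => (PySem.List.count L (w, t) : Int))).getD "") = m := by
    rw [htags, hf, hmax]
    rfl
  rw [hAval, hBval]
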